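-- pv_equiv track=rewrite | github.com/nohnoori/Algorithm_study | 백준/재귀/별 찍기 -10/ㄴㄹ/start.py | stars
-- ===== SOURCE A (Python) =====
-- def stars(n):
--     matrix=[]
--     for i in range(len(n)*3):
--         if i//len(n)==1:
--             matrix.append(n[i%len(n)]+" "*len(n)+n[i%len(n)])
--         else:
--             matrix.append(n[i%len(n)]*3)
--     return matrix
-- ===== SOURCE B (Python) =====
-- def stars(n):
--     top = [row * 3 for row in n]
--     mid = [row + " " * len(n) + row for row in n]
--     return top + mid + top
-- ===== Notes on version B (the rewrite author's own statement) =====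
-- stated objective: simpler
-- what changed: Builds the three blocks directly (top = row*3 rows, mid = row+spaces+row rows) and concatenates them, instead of one interleaved loop over range(3*len(n)) picking the block with i//len(n) and the row with i%len(n).
import Mathlib
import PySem

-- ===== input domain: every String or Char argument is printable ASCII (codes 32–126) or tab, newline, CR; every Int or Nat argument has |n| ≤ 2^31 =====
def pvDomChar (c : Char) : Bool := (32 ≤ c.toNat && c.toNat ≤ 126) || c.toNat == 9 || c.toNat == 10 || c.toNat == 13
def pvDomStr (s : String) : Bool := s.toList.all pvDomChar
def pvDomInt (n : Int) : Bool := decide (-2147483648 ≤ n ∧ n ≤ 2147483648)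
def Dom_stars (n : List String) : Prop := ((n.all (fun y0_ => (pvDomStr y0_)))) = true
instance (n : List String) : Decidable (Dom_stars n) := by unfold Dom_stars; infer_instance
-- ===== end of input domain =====

-- B builds the three blocks directly (top/mid/top) instead of A's single loop over
-- range(3*len(n)) with i//len(n) and i%len(n); return values are identical.

-- ===== PORT A =====
-- one loop over range(len(n)*3); block chosen by i//len(n), row by i%len(n)
def stars (n : List String) : List String :=
  (PySem.List.pyRange 0 (PySem.List.len n * 3) 1).foldl
    (fun matrix i =>
      if PySem.Int.floordiv i (PySem.List.len n) = 1 then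
        matrix ++ [String.ofList
          ((PySem.List.pyGetD n (PySem.Int.mod i (PySem.List.len n)) "").toList
            ++ PySem.List.pyRepeat [' '] (PySem.List.len n)
            ++ (PySem.List.pyGetD n (PySem.Int.mod i (PySem.List.len n)) "").toList)]
      else
        matrix ++ [String.ofList
          (PySem.List.pyRepeat (PySem.List.pyGetD n (PySem.Int.mod i (PySem.List.len n)) "").toList 3)])
    []

-- ===== PORT B =====
-- three shaped passes over n, then concatenation
def stars_alt (n : List String) : List String :=
  let top := n.map (fun row => String.ofList (PySem.List.pyRepeat row.toList 3))
  let mid := n.map (fun row =>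
    String.ofList (row.toList ++ PySem.List.pyRepeat [' '] (PySem.List.len n) ++ row.toList))
  top ++ mid ++ top

-- ===== PRECONDITION & SPEC =====
def Spec_stars (n : List String) (out : List String) : Prop := out = stars_alt n
instance (n : List String) (out : List String) : Decidable (Spec_stars n out) := by unfold Spec_stars; infer_instance

-- ===== CLAIM (what is proved, stated in full; the proofs are below) =====
def Claim_equal_stars : Prop := ∀ (n : List String), Dom_stars n → Spec_stars n (stars n)

-- ===== LEMMAS AND PROOFS =====

-- mapping g over getD-at-index along range(len) is just mapping g over the list
theorem range_map_getD {α β : Type} (xs : List α) (d : α) (g : α → β) :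
    (List.range xs.length).map (fun k => g (xs.getD k d)) = xs.map g := by
  apply List.ext_getElem
  · simp
  · intro i h1 h2
    simp only [List.length_map, List.length_range] at h1
    simp [List.getD, List.getElem?_eq_getElem h1]

-- one block of A's loop: the range [c*L, c*L+L) with row index i % L produces n.map g
theorem block_map (n : List String) (c : Nat) (g : String → String) :
    (PySem.List.pyRange ((c : Int) * n.length) ((c : Int) * n.length + n.length) 1).map
      (fun i => g (PySem.List.pyGetD n (PySem.Int.mod i (n.length : Int)) "")) = n.map g := by
  rcases Nat.eq_zero_or_pos n.length with h0 | hpos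
  · simp [PySem.List.pyRange_one_eq_nil, List.length_eq_zero_iff.mp h0]
  · rw [PySem.List.pyRange_one]
    have hn : ((c : Int) * n.length + n.length - (c : Int) * n.length).toNat = n.length := by
      omega
    rw [hn, List.map_map]
    rw [← range_map_getD n "" g]
    apply List.map_congr_left
    intro k hk
    rw [List.mem_range] at hk
    have hmod : PySem.Int.mod ((c : Int) * n.length + k) (n.length : Int) = (k : Int) := by
      rw [PySem.Int.mod_eq_emod_of_pos (by exact_mod_cast hpos)]
      rw [show (c : Int) * (n.length : Int) + (k : Int) = (k : Int) + (n.length : Int) * c by ring,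
          Int.add_mul_emod_self_left]
      exact Int.emod_eq_of_lt (by omega) (by exact_mod_cast hk)
    simp only [Function.comp, hmod, PySem.List.pyGetD_natCast]

-- inside block c, the branch test i // L = 1 is just c = 1
theorem floordiv_in_block (L : Int) (c : Nat) (i : Int) (hL : 0 < L)
    (h1 : (c : Int) * L ≤ i) (h2 : i < (c : Int) * L + L) :
    PySem.Int.floordiv i L = (c : Int) := by
  rw [PySem.Int.floordiv_eq_ediv_of_pos hL]
  rw [show i = (i - (c : Int) * L) + (c : Int) * L by ring,
      Int.add_mul_ediv_right _ _ (ne_of_gt hL),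
      Int.ediv_eq_zero_of_lt (by omega) (by omega)]
  ring

theorem stars_spec_aux (n : List String) : stars n = stars_alt n := by
  unfold stars stars_alt
  simp only [PySem.List.len_eq]
  have hsplit1 : PySem.List.pyRange 0 ((n.length : Int) * 3) 1 =
      PySem.List.pyRange 0 (n.length : Int) 1 ++
      (PySem.List.pyRange (n.length : Int) ((n.length : Int) * 2) 1 ++
       PySem.List.pyRange ((n.length : Int) * 2) ((n.length : Int) * 3) 1) := by
    rw [PySem.List.pyRange_one_append 0 ((n.length : Int)) ((n.length : Int) * 3) (by omega) (by omega),
        PySem.List.pyRange_one_append ((n.length : Int)) ((n.length : Int) * 2) ((n.length : Int) * 3) (by omega) (by omega)]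
  rw [hsplit1]
  rw [List.foldl_append, List.foldl_append]
  rcases Nat.eq_zero_or_pos n.length with h0 | hpos
  · have : n = [] := List.length_eq_zero_iff.mp h0
    simp [this, PySem.List.pyRange_one_eq_nil]
  have hposI : (0 : Int) < (n.length : Int) := by exact_mod_cast hpos
  -- evaluate each of the three folds
  have hblk : ∀ (c : Nat) (acc : List String),
      (PySem.List.pyRange ((c : Int) * n.length) ((c : Int) * n.length + n.length) 1).foldl
        (fun matrix i =>
          if PySem.Int.floordiv i (n.length : Int) = 1 then
            matrix ++ [String.ofList
              ((PySem.List.pyGetD n (PySem.Int.mod i (n.length : Int)) "").toList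
                ++ PySem.List.pyRepeat [' '] (n.length : Int)
                ++ (PySem.List.pyGetD n (PySem.Int.mod i (n.length : Int)) "").toList)]
          else
            matrix ++ [String.ofList
              (PySem.List.pyRepeat (PySem.List.pyGetD n (PySem.Int.mod i (n.length : Int)) "").toList 3)])
        acc
      = acc ++ n.map (fun row =>
          if (c : Int) = 1 then
            String.ofList (row.toList ++ PySem.List.pyRepeat [' '] (n.length : Int) ++ row.toList)
          else String.ofList (PySem.List.pyRepeat row.toList 3)) := by
    intro c acc
    have hcongr : (PySem.List.pyRange ((c : Int) * n.length) ((c : Int) * n.length + n.length) 1).foldl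
        (fun matrix i =>
          if PySem.Int.floordiv i (n.length : Int) = 1 then
            matrix ++ [String.ofList
              ((PySem.List.pyGetD n (PySem.Int.mod i (n.length : Int)) "").toList
                ++ PySem.List.pyRepeat [' '] (n.length : Int)
                ++ (PySem.List.pyGetD n (PySem.Int.mod i (n.length : Int)) "").toList)]
          else
            matrix ++ [String.ofList
              (PySem.List.pyRepeat (PySem.List.pyGetD n (PySem.Int.mod i (n.length : Int)) "").toList 3)])
        acc
        = (PySem.List.pyRange ((c : Int) * n.length) ((c : Int) * n.length + n.length) 1).foldl
        (fun matrix i => matrix ++ [(fun s =>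
          if (c : Int) = 1 then
            String.ofList (s.toList ++ PySem.List.pyRepeat [' '] (n.length : Int) ++ s.toList)
          else String.ofList (PySem.List.pyRepeat s.toList 3))
          (PySem.List.pyGetD n (PySem.Int.mod i (n.length : Int)) "")]) acc := by
      apply PySem.List.foldl_congr_mem
      intro matrix i hi
      rw [PySem.List.mem_pyRange_one] at hi
      rw [floordiv_in_block (n.length : Int) c i hposI hi.1 hi.2]
      split_ifs <;> rfl
    rw [hcongr, PySem.List.foldl_append_singleton_eq_map,
        block_map n c (fun s =>
          if (c : Int) = 1 then
            String.ofList (s.toList ++ PySem.List.pyRepeat [' '] (n.length : Int) ++ s.toList)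
          else String.ofList (PySem.List.pyRepeat s.toList 3))]
  have h0' : ((0 : Nat) : Int) * (n.length : Int) = 0 := by ring
  have h1' : ((1 : Nat) : Int) * (n.length : Int) = (n.length : Int) := by ring
  have h2' : ((2 : Nat) : Int) * (n.length : Int) = (n.length : Int) * 2 := by ring
  have e0 := hblk 0 []
  have e1 := hblk 1
  have e2 := hblk 2
  rw [h0'] at e0
  simp only [zero_add] at e0
  simp only [h1'] at e1
  simp only [h2'] at e2
  have hend1 : (n.length : Int) + (n.length : Int) = (n.length : Int) * 2 := by ring
  have hend2 : (n.length : Int) * 2 + (n.length : Int) = (n.length : Int) * 3 := by ring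
  rw [hend1] at e1
  rw [hend2] at e2
  rw [e0, e1, e2]
  simp

-- ===== VERDICT (by name: the statement is the Claim_ definition above) =====
theorem stars_spec : Claim_equal_stars := by
  intro n _
  unfold Spec_stars
  exact stars_spec_aux n
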